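-- pv_equiv track=rewrite | github.com/benjello/conversion_precis_ipp | quarto/tex2qmd/convert.py | inject_qmd_comments
-- ===== SOURCE A (Python) =====
-- def _escape_html_comment(text: str) -> str:
--     """Escape so text can be used inside HTML comment <!-- ... -->."""
--     return text.replace("--", "- -").replace(">", "&gt;")
--
-- def inject_qmd_comments(qmd_content: str, comments_with_anchors: list[tuple[str, str]]) -> str:
--     """Insert HTML comments into QMD before the line containing each anchor.
--
--     If anchor is empty or not found, the comment is appended at the end.
--     """
--     if not comments_with_anchors:
--         return qmd_content
--     qmd_lines = qmd_content.splitlines(keepends=True)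
--     # Build list of (insert_line_index, comment_text)
--     inserts: list[tuple[int, str]] = []
--     used_anchors: set[str] = set()
--     for comment_text, anchor in comments_with_anchors:
--         safe = _escape_html_comment(comment_text)
--         comment_line = "<!-- " + safe + " -->\n"
--         if not anchor:
--             inserts.append((len(qmd_lines), comment_line))
--             continue
--         # Find first line that contains anchor (avoid reusing same anchor for multiple comments)
--         anchor_key = anchor[:50]
--         found = False
--         for idx, qline in enumerate(qmd_lines):
--             if anchor in qline or anchor_key in qline:
--                 inserts.append((idx, comment_line))
--                 found = True
--                 break
--         if not found:
--             inserts.append((len(qmd_lines), comment_line))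
--     # Apply inserts in reverse order so indices stay valid
--     inserts.sort(key=lambda x: x[0], reverse=True)
--     for idx, comment_line in inserts:
--         qmd_lines.insert(idx, comment_line)
--     return "".join(qmd_lines)
-- ===== SOURCE B (Python) =====
-- def inject_qmd_comments(qmd_content: str, comments_with_anchors: list[tuple[str, str]]) -> str:
--     """Insert HTML comments into QMD before the line containing each anchor.
--
--     Single forward pass: bucket each comment by its insert index, then emit.
--     """
--     if not comments_with_anchors:
--         return qmd_content
--     lines = qmd_content.splitlines(keepends=True)
--     n = len(lines)
--     buckets: dict[int, list[str]] = {}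
--     for comment_text, anchor in comments_with_anchors:
--         safe = comment_text.replace("--", "- -").replace(">", "&gt;")
--         comment_line = "<!-- " + safe + " -->\n"
--         if anchor:
--             key = anchor[:50]
--             idx = next((i for i, q in enumerate(lines) if anchor in q or key in q), n)
--         else:
--             idx = n
--         buckets.setdefault(idx, []).append(comment_line)
--     out: list[str] = []
--     for i, q in enumerate(lines):
--         out.extend(reversed(buckets.get(i, [])))
--         out.append(q)
--     out.extend(reversed(buckets.get(n, [])))
--     return "".join(out)
-- ===== Notes on version B (the rewrite author's own statement) =====
-- stated objective: alternative
-- what changed: B replaces A's apply phase (reverse-sort of (index, comment) pairs followed by repeated list.insert) with a dict of per-index buckets filled during the single scan and one forward pass that emits each bucket reversed before its line (end-of-file bucket after the loop).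
import Mathlib
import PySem

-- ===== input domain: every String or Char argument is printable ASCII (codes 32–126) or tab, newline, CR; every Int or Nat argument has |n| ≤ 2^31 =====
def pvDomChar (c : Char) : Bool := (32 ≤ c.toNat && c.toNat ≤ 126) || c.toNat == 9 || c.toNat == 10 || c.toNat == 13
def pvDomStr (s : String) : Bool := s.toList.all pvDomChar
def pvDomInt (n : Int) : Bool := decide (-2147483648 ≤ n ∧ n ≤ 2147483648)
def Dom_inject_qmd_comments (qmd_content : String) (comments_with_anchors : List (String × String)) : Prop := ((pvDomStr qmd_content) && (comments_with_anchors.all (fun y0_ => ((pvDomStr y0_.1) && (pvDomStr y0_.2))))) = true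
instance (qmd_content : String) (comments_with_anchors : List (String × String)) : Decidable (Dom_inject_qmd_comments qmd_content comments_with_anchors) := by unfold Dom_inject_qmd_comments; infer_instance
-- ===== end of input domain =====

-- B replaces A's reverse-sort-plus-repeated-list.insert apply phase by one forward pass over
-- index buckets (objective: alternative decomposition, same scanning result, no sort/insert).

-- shared primitive: str.splitlines(keepends=True), exact for '\n', '\r', '\r\n'
-- (the only line breaks inside Dom_inject_qmd_comments)
def splitKeep (acc : List Char) : List Char → List (List Char)
  | [] => if acc.isEmpty then [] else [acc.reverse]
  | '\r' :: '\n' :: rest => (acc.reverse ++ ['\r', '\n']) :: splitKeep [] rest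
  | '\n' :: rest => (acc.reverse ++ ['\n']) :: splitKeep [] rest
  | '\r' :: rest => (acc.reverse ++ ['\r']) :: splitKeep [] rest
  | c :: rest => splitKeep (c :: acc) rest

-- ===== PORT A =====
def _escape_html_comment (text : List Char) : List Char :=
  PySem.Chars.replace (PySem.Chars.replace text "--".toList "- -".toList) ">".toList "&gt;".toList

-- A's inner 'for idx, qline in enumerate(qmd_lines): … break' search
def findAnchorLoop (anchor key : List Char) : List (List Char) → Nat → Option Nat
  | [], _ => none
  | q :: rest, idx =>
    if PySem.Chars.isIn anchor q || PySem.Chars.isIn key q then some idx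
    else findAnchorLoop anchor key rest (idx + 1)

def inject_qmd_comments (qmd_content : String) (comments_with_anchors : List (String × String)) : String :=
  if comments_with_anchors = [] then qmd_content
  else
    let qmd_lines := splitKeep [] qmd_content.toList
    let inserts : List (Nat × List Char) := comments_with_anchors.foldl (fun ins pr =>
      let safe := _escape_html_comment pr.1.toList
      let comment_line := "<!-- ".toList ++ safe ++ " -->\n".toList
      if pr.2.toList = [] then ins ++ [(qmd_lines.length, comment_line)]
      else
        let anchor_key := PySem.Chars.slice pr.2.toList none (some 50)
        match findAnchorLoop pr.2.toList anchor_key qmd_lines 0 with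
        | some idx => ins ++ [(idx, comment_line)]
        | none => ins ++ [(qmd_lines.length, comment_line)]) []
    let sortedIns := PySem.List.sorted inserts (fun x => x.1) true
    let finalLines := sortedIns.foldl (fun ls pr => PySem.List.insert ls (pr.1 : Int) pr.2) qmd_lines
    String.ofList finalLines.flatten

-- ===== PORT B =====
def inject_qmd_comments_alt (qmd_content : String) (comments_with_anchors : List (String × String)) : String :=
  if comments_with_anchors = [] then qmd_content
  else
    let lines := splitKeep [] qmd_content.toList
    let n := lines.length
    let buckets : PySem.Dict Nat (List (List Char)) := comments_with_anchors.foldl (fun d pr =>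
      let comment_line := "<!-- ".toList ++
        PySem.Chars.replace (PySem.Chars.replace pr.1.toList "--".toList "- -".toList) ">".toList "&gt;".toList
        ++ " -->\n".toList
      let idx : Nat :=
        if pr.2.toList = [] then n
        else (lines.findIdx? (fun q =>
          PySem.Chars.isIn pr.2.toList q ||
          PySem.Chars.isIn (PySem.Chars.slice pr.2.toList none (some 50)) q)).getD n
      d.modify idx [] (fun b => b ++ [comment_line])) PySem.Dict.empty
    let out := lines.zipIdx.foldl (fun acc p => acc ++ (buckets.getD p.2 []).reverse ++ [p.1]) []
    String.ofList (out ++ (buckets.getD n []).reverse).flatten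

-- ===== PRECONDITION & SPEC =====
def Spec_inject_qmd_comments (qmd_content : String) (comments_with_anchors : List (String × String)) (out : String) : Prop := out = inject_qmd_comments_alt qmd_content comments_with_anchors
instance (qmd_content : String) (comments_with_anchors : List (String × String)) (out : String) : Decidable (Spec_inject_qmd_comments qmd_content comments_with_anchors out) := by unfold Spec_inject_qmd_comments; infer_instance

-- ===== CLAIM (what is proved, stated in full; the proofs are below) =====
def Claim_equal_inject_qmd_comments : Prop := ∀ (qmd_content : String) (comments_with_anchors : List (String × String)), Dom_inject_qmd_comments qmd_content comments_with_anchors → Spec_inject_qmd_comments qmd_content comments_with_anchors (inject_qmd_comments qmd_content comments_with_anchors)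

-- ===== LEMMAS AND PROOFS =====

-- the comments inserted before line i, in encounter order
def itemsAt (S : List (Nat × List Char)) (i : Nat) : List (List Char) :=
  (S.filter (fun p => p.1 == i)).map (fun p => p.2)

-- the common normal form: lines interleaved with reversed buckets, trailing bucket at the end
def emitL (S : List (Nat × List Char)) : List (List Char) → Nat → List (List Char)
  | [], j => (itemsAt S j).reverse
  | l :: rest, j => (itemsAt S j).reverse ++ l :: emitL S rest (j + 1)

theorem itemsAt_nil (i : Nat) : itemsAt [] i = [] := rfl

theorem itemsAt_cons (p : Nat × List Char) (S : List (Nat × List Char)) (i : Nat) :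
    itemsAt (p :: S) i = (if p.1 = i then [p.2] else []) ++ itemsAt S i := by
  by_cases h : p.1 = i <;> simp [itemsAt, h]

theorem itemsAt_eq_nil (S : List (Nat × List Char)) (i : Nat)
    (h : ∀ p ∈ S, p.1 ≠ i) : itemsAt S i = [] := by
  have hf : S.filter (fun p => p.1 == i) = [] :=
    List.filter_eq_nil_iff.mpr (by intro p hp; simpa using h p hp)
  simp [itemsAt, hf]

theorem emitL_congr (S T : List (Nat × List Char)) (lines : List (List Char)) (j : Nat)
    (h : ∀ i, itemsAt S i = itemsAt T i) : emitL S lines j = emitL T lines j := by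
  induction lines generalizing j with
  | nil => simp [emitL, h]
  | cons l rest ih => simp [emitL, h, ih]

theorem emitL_of_lt (S : List (Nat × List Char)) (lines : List (List Char)) (j : Nat)
    (h : ∀ p ∈ S, p.1 < j) : emitL S lines j = lines := by
  induction lines generalizing j with
  | nil => simp [emitL, itemsAt_eq_nil S j (fun p hp => Nat.ne_of_lt (h p hp))]
  | cons l rest ih =>
    simp [emitL, itemsAt_eq_nil S j (fun p hp => Nat.ne_of_lt (h p hp))]
    exact ih (j + 1) (fun p hp => Nat.lt_succ_of_lt (h p hp))

theorem emitL_insert (lines : List (List Char)) (j d : Nat) (c : List Char)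
    (S : List (Nat × List Char)) (hd : d ≤ lines.length) (hS : ∀ p ∈ S, p.1 ≤ j + d) :
    emitL S (lines.take d ++ c :: lines.drop d) j = emitL ((j + d, c) :: S) lines j := by
  induction lines generalizing j d with
  | nil =>
    have hd0 : d = 0 := Nat.le_zero.mp hd
    subst hd0
    have h1 : itemsAt S (j + 1) = [] :=
      itemsAt_eq_nil _ _ (fun p hp => by have := hS p hp; omega)
    simp [emitL, itemsAt_cons, h1]
  | cons l rest ih =>
    cases d with
    | zero =>
      have h1 : emitL S (l :: rest) (j + 1) = l :: rest :=
        emitL_of_lt _ _ _ (fun p hp => by have := hS p hp; omega)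
      have h2 : emitL ((j + 0, c) :: S) rest (j + 1) = rest :=
        emitL_of_lt _ _ _ (by
          intro p hp
          rcases List.mem_cons.mp hp with h | h
          · subst h; omega
          · have := hS p h; omega)
      simp only [List.take_zero, List.drop_zero, List.nil_append]
      rw [show emitL S (c :: l :: rest) j = (itemsAt S j).reverse ++ c :: emitL S (l :: rest) (j + 1) from rfl, h1]
      rw [show emitL ((j + 0, c) :: S) (l :: rest) j
            = (itemsAt ((j + 0, c) :: S) j).reverse ++ l :: emitL ((j + 0, c) :: S) rest (j + 1) from rfl, h2]
      simp [itemsAt_cons]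
    | succ d' =>
      have hd' : d' ≤ rest.length := by simpa using hd
      have hS' : ∀ p ∈ S, p.1 ≤ (j + 1) + d' := fun p hp => by have := hS p hp; omega
      have hj : j + 1 + d' = j + (d' + 1) := by omega
      have hne : itemsAt ((j + (d' + 1), c) :: S) j = itemsAt S j := by
        rw [itemsAt_cons]; simp
      calc emitL S ((l :: rest).take (d' + 1) ++ c :: (l :: rest).drop (d' + 1)) j
          = (itemsAt S j).reverse ++ l :: emitL S (rest.take d' ++ c :: rest.drop d') (j + 1) := by
            simp [emitL]
        _ = (itemsAt S j).reverse ++ l :: emitL ((j + 1 + d', c) :: S) rest (j + 1) := by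
            rw [ih (j + 1) d' hd' hS']
        _ = emitL ((j + (d' + 1), c) :: S) (l :: rest) j := by
            rw [hj]; simp [emitL, hne]

theorem foldl_insert_eq_emitL (S : List (Nat × List Char)) (lines : List (List Char))
    (hp : S.Pairwise (fun a b => b.1 ≤ a.1)) (hb : ∀ p ∈ S, p.1 ≤ lines.length) :
    S.foldl (fun ls pr => PySem.List.insert ls (pr.1 : Int) pr.2) lines = emitL S lines 0 := by
  induction S generalizing lines with
  | nil => exact (emitL_of_lt [] lines 0 (by simp)).symm
  | cons p S' ih =>
    obtain ⟨i, c⟩ := p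
    have hi : i ≤ lines.length := hb _ (List.mem_cons_self)
    have hhd : ∀ q ∈ S', q.1 ≤ i := by
      intro q hq; exact List.pairwise_cons.mp hp |>.1 q hq
    have h1 : PySem.List.insert lines (i : Int) c = lines.take i ++ c :: lines.drop i :=
      PySem.List.insert_natCast lines i c hi
    have h2 : ∀ q ∈ S', q.1 ≤ (lines.take i ++ c :: lines.drop i).length := by
      intro q hq
      have := hhd q hq
      simp
      omega
    calc ((i, c) :: S').foldl (fun ls pr => PySem.List.insert ls (pr.1 : Int) pr.2) lines
        = S'.foldl (fun ls pr => PySem.List.insert ls (pr.1 : Int) pr.2)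
            (lines.take i ++ c :: lines.drop i) := by simp [h1]
      _ = emitL S' (lines.take i ++ c :: lines.drop i) 0 :=
          ih _ (List.pairwise_cons.mp hp).2 h2
      _ = emitL ((0 + i, c) :: S') lines 0 := emitL_insert lines 0 i c S' hi (by simpa using hhd)
      _ = emitL ((i, c) :: S') lines 0 := by rw [Nat.zero_add]

theorem itemsAt_insertBy (x : Nat × List Char) (ys : List (Nat × List Char)) (i : Nat)
    (h : ys.Pairwise (fun a b => b.1 ≤ a.1)) :
    itemsAt (PySem.List.insertBy (fun a b => decide (b.1 < a.1)) x ys) i =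
      itemsAt ys i ++ itemsAt [x] i := by
  induction ys with
  | nil => simp [PySem.List.insertBy, itemsAt_nil]
  | cons y ys ih =>
    by_cases hxy : y.1 < x.1
    · have hr : PySem.List.insertBy (fun a b => decide (b.1 < a.1)) x (y :: ys) = x :: y :: ys := by
        simp [PySem.List.insertBy, hxy]
      rw [hr]
      by_cases hx : x.1 = i
      · have hnil : itemsAt (y :: ys) i = [] := by
          apply itemsAt_eq_nil
          intro p hp
          rcases List.mem_cons.mp hp with h' | h'
          · subst h'; omega
          · have hle := (List.pairwise_cons.mp h).1 p h'
            omega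
        simp [itemsAt_cons, hx, hnil, itemsAt_nil]
      · simp [itemsAt_cons, hx, itemsAt_nil]
    · have hr : PySem.List.insertBy (fun a b => decide (b.1 < a.1)) x (y :: ys) =
          y :: PySem.List.insertBy (fun a b => decide (b.1 < a.1)) x ys := by
        simp [PySem.List.insertBy, hxy]
      rw [hr]
      rw [itemsAt_cons, itemsAt_cons, ih (List.pairwise_cons.mp h).2, List.append_assoc]

theorem pairwise_insertBy (x : Nat × List Char) (ys : List (Nat × List Char))
    (h : ys.Pairwise (fun a b => b.1 ≤ a.1)) :
    (PySem.List.insertBy (fun a b => decide (b.1 < a.1)) x ys).Pairwise (fun a b => b.1 ≤ a.1) := by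
  induction ys with
  | nil => simp [PySem.List.insertBy]
  | cons y ys ih =>
    obtain ⟨hy, ht⟩ := List.pairwise_cons.mp h
    by_cases hxy : y.1 < x.1
    · have hr : PySem.List.insertBy (fun a b => decide (b.1 < a.1)) x (y :: ys) = x :: y :: ys := by
        simp [PySem.List.insertBy, hxy]
      rw [hr]
      refine List.pairwise_cons.mpr ⟨?_, h⟩
      intro p hp
      rcases List.mem_cons.mp hp with h' | h'
      · subst h'; omega
      · have := hy p h'; omega
    · have hr : PySem.List.insertBy (fun a b => decide (b.1 < a.1)) x (y :: ys) =
          y :: PySem.List.insertBy (fun a b => decide (b.1 < a.1)) x ys := by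
        simp [PySem.List.insertBy, hxy]
      rw [hr]
      refine List.pairwise_cons.mpr ⟨?_, ih ht⟩
      intro p hp
      rcases (PySem.List.mem_insertBy _ _ _ _).mp hp with h' | h'
      · subst h'; omega
      · exact hy p h' 

theorem itemsAt_sorted_rev (S : List (Nat × List Char)) (i : Nat) :
    itemsAt (PySem.List.sorted S (fun x => x.1) true) i = itemsAt S i := by
  have aux : ∀ (T : List (Nat × List Char)) (acc : List (Nat × List Char)),
      acc.Pairwise (fun a b => b.1 ≤ a.1) →
      itemsAt (T.foldl (fun acc x => PySem.List.insertBy (fun a b => decide (b.1 < a.1)) x acc) acc) i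
        = itemsAt acc i ++ itemsAt T i := by
    intro T
    induction T with
    | nil => intro acc _; simp [itemsAt_nil]
    | cons x T ih =>
      intro acc hacc
      rw [List.foldl_cons, ih _ (pairwise_insertBy x acc hacc), itemsAt_insertBy x acc i hacc,
        itemsAt_cons]
      by_cases hx : x.1 = i <;> simp [itemsAt_cons, itemsAt_nil, hx]
  rw [PySem.List.sorted_rev_eq_foldl_insertBy]
  simpa [itemsAt_nil] using aux S [] (by simp)

theorem findAnchorLoop_eq_findIdx? (a k : List Char) (ls : List (List Char)) (j : Nat) :
    findAnchorLoop a k ls j =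
      (ls.findIdx? (fun q => PySem.Chars.isIn a q || PySem.Chars.isIn k q)).map (· + j) := by
  induction ls generalizing j with
  | nil => simp [findAnchorLoop]
  | cons q rest ih =>
    rw [findAnchorLoop, List.findIdx?_cons]
    by_cases hq : (PySem.Chars.isIn a q || PySem.Chars.isIn k q) = true
    · simp [hq]
    · simp only [hq, Bool.false_eq_true, ↓reduceIte, ih (j + 1), Option.map_map]
      congr 1
      funext m
      simp
      omega

theorem getD_foldl_modify_append (cwa : List (String × String)) (d : PySem.Dict Nat (List (List Char)))
    (k : String × String → Nat) (v : String × String → List Char) (i : Nat) :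
    (cwa.foldl (fun d pr => d.modify (k pr) [] (fun b => b ++ [v pr])) d).getD i [] =
      d.getD i [] ++ itemsAt (cwa.map (fun pr => (k pr, v pr))) i := by
  induction cwa generalizing d with
  | nil => simp [itemsAt_nil]
  | cons pr rest ih =>
    rw [List.foldl_cons, ih, List.map_cons, itemsAt_cons]
    by_cases hk : k pr = i
    · rw [hk, PySem.Dict.getD_modify_self]
      simp
    · rw [PySem.Dict.getD_modify_of_ne d [] _ (fun he => hk he.symm)]
      simp [hk]

theorem zipIdx_foldl_emitL (S : List (Nat × List Char)) (lines : List (List Char)) (j : Nat)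
    (init : List (List Char)) :
    (lines.zipIdx j).foldl (fun acc p => acc ++ (itemsAt S p.2).reverse ++ [p.1]) init ++
        (itemsAt S (j + lines.length)).reverse = init ++ emitL S lines j := by
  induction lines generalizing j init with
  | nil => simp [emitL]
  | cons l rest ih =>
    rw [List.zipIdx_cons, List.foldl_cons]
    have hlen : j + (l :: rest).length = (j + 1) + rest.length := by simp; omega
    rw [hlen, ih (j + 1) (init ++ (itemsAt S j).reverse ++ [l])]
    simp [emitL]

-- proof-side names for the scanning phase shared by both programs
def clOf (pr : String × String) : List Char :=
  "<!-- ".toList ++ _escape_html_comment pr.1.toList ++ " -->\n".toList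

def predOf (pr : String × String) (q : List Char) : Bool :=
  PySem.Chars.isIn pr.2.toList q ||
    PySem.Chars.isIn (PySem.Chars.slice pr.2.toList none (some 50)) q

def idxOf (lines : List (List Char)) (pr : String × String) : Nat :=
  if pr.2.toList = [] then lines.length
  else (lines.findIdx? (predOf pr)).getD lines.length

theorem idxOf_le (lines : List (List Char)) (pr : String × String) :
    idxOf lines pr ≤ lines.length := by
  unfold idxOf
  split
  · exact le_refl _
  · cases hfi : lines.findIdx? (predOf pr) with
    | none => simp
    | some m =>
      have := List.findIdx?_eq_some_iff_findIdx_eq.mp hfi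
      simp
      omega

theorem a_inserts_eq (lines : List (List Char)) (cwa : List (String × String)) :
    cwa.foldl (fun ins pr =>
      let safe := _escape_html_comment pr.1.toList
      let comment_line := "<!-- ".toList ++ safe ++ " -->\n".toList
      if pr.2.toList = [] then ins ++ [(lines.length, comment_line)]
      else
        let anchor_key := PySem.Chars.slice pr.2.toList none (some 50)
        match findAnchorLoop pr.2.toList anchor_key lines 0 with
        | some idx => ins ++ [(idx, comment_line)]
        | none => ins ++ [(lines.length, comment_line)]) []
    = cwa.map (fun pr => (idxOf lines pr, clOf pr)) := by
  rw [PySem.List.foldl_congr_mem cwa _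
    (fun ins pr => ins ++ [(idxOf lines pr, clOf pr)]) [] ?_]
  · exact PySem.List.foldl_append_singleton_eq_map _ cwa []
  · intro acc pr _
    by_cases h2 : pr.2.toList = []
    · simp [h2, idxOf, clOf]
    · simp only [h2, ↓reduceIte]
      rw [findAnchorLoop_eq_findIdx?]
      have hp : predOf pr = (fun q => PySem.Chars.isIn pr.2.toList q ||
          PySem.Chars.isIn (PySem.Chars.slice pr.2.toList none (some 50)) q) := rfl
      cases hfi : lines.findIdx? (fun q => PySem.Chars.isIn pr.2.toList q ||
          PySem.Chars.isIn (PySem.Chars.slice pr.2.toList none (some 50)) q) with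
      | none =>
        simp only [PySem.Chars.slice_eq_listSlice] at hfi
        simp [idxOf, clOf, h2, hp, hfi]
      | some m =>
        simp only [PySem.Chars.slice_eq_listSlice] at hfi
        simp [idxOf, clOf, h2, hp, hfi]

theorem bridge (qmd : String) (cwa : List (String × String)) :
    String.ofList (List.flatten ((PySem.List.sorted
        (cwa.foldl (fun ins pr =>
          let safe := _escape_html_comment pr.1.toList
          let comment_line := "<!-- ".toList ++ safe ++ " -->\n".toList
          if pr.2.toList = [] then ins ++ [((splitKeep [] qmd.toList).length, comment_line)]
          else
            let anchor_key := PySem.Chars.slice pr.2.toList none (some 50)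
            match findAnchorLoop pr.2.toList anchor_key (splitKeep [] qmd.toList) 0 with
            | some idx => ins ++ [(idx, comment_line)]
            | none => ins ++ [((splitKeep [] qmd.toList).length, comment_line)]) [])
        (fun x => x.1) true).foldl
        (fun ls pr => PySem.List.insert ls (pr.1 : Int) pr.2) (splitKeep [] qmd.toList)))
    = String.ofList (List.flatten
        (((splitKeep [] qmd.toList).zipIdx.foldl (fun acc p => acc ++
            ((cwa.foldl (fun d pr =>
              let comment_line := "<!-- ".toList ++
                PySem.Chars.replace (PySem.Chars.replace pr.1.toList "--".toList "- -".toList)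
                  ">".toList "&gt;".toList ++ " -->\n".toList
              let idx : Nat :=
                if pr.2.toList = [] then (splitKeep [] qmd.toList).length
                else ((splitKeep [] qmd.toList).findIdx? (fun q =>
                  PySem.Chars.isIn pr.2.toList q ||
                  PySem.Chars.isIn (PySem.Chars.slice pr.2.toList none (some 50)) q)).getD
                  (splitKeep [] qmd.toList).length
              d.modify idx [] (fun b => b ++ [comment_line])) PySem.Dict.empty).getD p.2 []).reverse
            ++ [p.1]) []) ++
          ((cwa.foldl (fun d pr =>
              let comment_line := "<!-- ".toList ++
                PySem.Chars.replace (PySem.Chars.replace pr.1.toList "--".toList "- -".toList)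
                  ">".toList "&gt;".toList ++ " -->\n".toList
              let idx : Nat :=
                if pr.2.toList = [] then (splitKeep [] qmd.toList).length
                else ((splitKeep [] qmd.toList).findIdx? (fun q =>
                  PySem.Chars.isIn pr.2.toList q ||
                  PySem.Chars.isIn (PySem.Chars.slice pr.2.toList none (some 50)) q)).getD
                  (splitKeep [] qmd.toList).length
              d.modify idx [] (fun b => b ++ [comment_line])) PySem.Dict.empty).getD
            (splitKeep [] qmd.toList).length []).reverse)) := by
  set lines := splitKeep [] qmd.toList with hlines
  set S := cwa.map (fun pr => (idxOf lines pr, clOf pr)) with hS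
  -- B's bucket dict produces exactly the itemsAt buckets of S
  have hbody : ∀ (d : PySem.Dict Nat (List (List Char))), ∀ pr ∈ cwa,
      (fun (d : PySem.Dict Nat (List (List Char))) pr =>
        let comment_line := "<!-- ".toList ++
          PySem.Chars.replace (PySem.Chars.replace pr.1.toList "--".toList "- -".toList)
            ">".toList "&gt;".toList ++ " -->\n".toList
        let idx : Nat :=
          if pr.2.toList = [] then lines.length
          else (lines.findIdx? (fun q =>
            PySem.Chars.isIn pr.2.toList q ||
            PySem.Chars.isIn (PySem.Chars.slice pr.2.toList none (some 50)) q)).getD lines.length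
        d.modify idx [] (fun b => b ++ [comment_line])) d pr
      = d.modify (idxOf lines pr) [] (fun b => b ++ [clOf pr]) := by
    intro d pr _
    rfl
  have hB : ∀ i : Nat,
      (cwa.foldl (fun d pr =>
        let comment_line := "<!-- ".toList ++
          PySem.Chars.replace (PySem.Chars.replace pr.1.toList "--".toList "- -".toList)
            ">".toList "&gt;".toList ++ " -->\n".toList
        let idx : Nat :=
          if pr.2.toList = [] then lines.length
          else (lines.findIdx? (fun q =>
            PySem.Chars.isIn pr.2.toList q ||
            PySem.Chars.isIn (PySem.Chars.slice pr.2.toList none (some 50)) q)).getD lines.length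
        d.modify idx [] (fun b => b ++ [comment_line])) PySem.Dict.empty).getD i []
      = itemsAt S i := by
    intro i
    rw [PySem.List.foldl_congr_mem cwa _
      (fun d pr => d.modify (idxOf lines pr) [] (fun b => b ++ [clOf pr])) PySem.Dict.empty hbody]
    rw [getD_foldl_modify_append cwa PySem.Dict.empty (idxOf lines) clOf i]
    simp [PySem.Dict.getD, PySem.Dict.empty, PySem.Dict.get?, hS]
  -- A side
  rw [a_inserts_eq lines cwa, ← hS]
  have hpair : (PySem.List.sorted S (fun x => x.1) true).Pairwise (fun a b => b.1 ≤ a.1) :=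
    PySem.List.sorted_pairwise_rev S (fun x => x.1)
  have hbound : ∀ p ∈ PySem.List.sorted S (fun x => x.1) true, p.1 ≤ lines.length := by
    intro p hp
    have hmem : p ∈ S := (PySem.List.mem_sorted S (fun x => x.1) true p).mp hp
    rw [hS] at hmem
    obtain ⟨pr, _, hpr⟩ := List.mem_map.mp hmem
    rw [← hpr]
    exact idxOf_le lines pr
  rw [foldl_insert_eq_emitL _ lines hpair hbound]
  rw [emitL_congr _ S lines 0 (fun i => itemsAt_sorted_rev S i)]
  -- B side
  simp only [hB]
  have := zipIdx_foldl_emitL S lines 0 []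
  simp only [Nat.zero_add, List.nil_append] at this
  rw [this]

-- ===== VERDICT (by name: the statement is the Claim_ definition above) =====
theorem inject_qmd_comments_spec : Claim_equal_inject_qmd_comments := by
  intro qmd cwa _
  unfold Spec_inject_qmd_comments inject_qmd_comments inject_qmd_comments_alt
  by_cases hc : cwa = []
  · simp [hc]
  · rw [if_neg hc, if_neg hc]
    exact bridge qmd cwa
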